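-- pv_equiv track=rewrite | github.com/alinowshad/Semantic_Caching_MVR | vcahce/benchmarks/filter_sembenchmark_from_cache.py | _prompt_hits_banned
-- ===== SOURCE A (Python) =====
-- from typing import Any, Dict, Iterable
--
-- def _prompt_hits_banned(prompt: Any, banned_sentences: set[str], match_substring: bool) -> bool:
--     if not banned_sentences or not isinstance(prompt, str):
--         return False
--     p = prompt.strip()
--     if not p:
--         return False
--     if match_substring:
--         for s in banned_sentences:
--             if s and s in p:
--                 return True
--         return False
--     return p in banned_sentences
-- ===== SOURCE B (Python) =====
-- def _prompt_hits_banned(prompt, banned_sentences, match_substring):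
--     if not isinstance(prompt, str):
--         return False
--     p = prompt.strip()
--     if not p or not banned_sentences:
--         return False
--     if not match_substring:
--         return any(s == p for s in banned_sentences)
--     pats = [s for s in banned_sentences if s]
--     # suffix scan: walk the prompt once, testing each pattern as a prefix of the current suffix
--     for i in range(len(p)):
--         for s in pats:
--             if p.startswith(s, i):
--                 return True
--     return False
-- ===== Notes on version B (the rewrite author's own statement) =====
-- stated objective: alternative
-- what changed: A does one whole-prompt substring search per banned pattern (pattern-major, via 'in'); B walks the prompt's suffixes once with an explicit index and hand-tests each non-empty pattern as a prefix of the current suffix (position-major, recursion over the suffix in the port), and replaces set membership by an explicit equality scan.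
import Mathlib
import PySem

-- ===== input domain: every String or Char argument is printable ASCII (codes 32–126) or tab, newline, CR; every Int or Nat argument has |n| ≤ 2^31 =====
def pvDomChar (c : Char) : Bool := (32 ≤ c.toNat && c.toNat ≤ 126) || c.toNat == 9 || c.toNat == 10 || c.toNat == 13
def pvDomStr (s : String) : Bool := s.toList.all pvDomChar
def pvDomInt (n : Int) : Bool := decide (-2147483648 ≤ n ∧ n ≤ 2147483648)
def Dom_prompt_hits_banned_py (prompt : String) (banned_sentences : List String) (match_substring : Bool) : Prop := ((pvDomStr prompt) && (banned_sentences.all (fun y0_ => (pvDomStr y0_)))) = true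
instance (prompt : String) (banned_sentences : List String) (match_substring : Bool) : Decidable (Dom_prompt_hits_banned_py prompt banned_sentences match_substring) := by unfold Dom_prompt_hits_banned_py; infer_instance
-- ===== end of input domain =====

-- B replaces A's pattern-major 'in' searches by a single position-major walk over the prompt's
-- suffixes with a hand-written prefix test, and set membership by an equality scan (alternative, not faster).

-- ===== PORT A =====
def prompt_hits_banned_py (prompt : String) (banned_sentences : List String) (match_substring : Bool) : Bool :=
  if banned_sentences.isEmpty then false
  else
    let p := PySem.Str.strip prompt
    if p == "" then false
    else if match_substring then
      -- for s in banned_sentences: if s and s in p: return True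
      banned_sentences.any (fun s => s != "" && PySem.Str.isIn s p)
    else
      banned_sentences.contains p

-- ===== PORT B =====
-- hand-written prefix test: p.startswith(s, i) character by character
def pvIsPrefix : List Char → List Char → Bool
  | [], _ => true
  | _ :: _, [] => false
  | a :: as, b :: bs => a == b && pvIsPrefix as bs

-- the 'for i in range(len(p)): for s in pats: …' walk, as recursion over the current suffix
def pvSuffixScan (pats : List (List Char)) : List Char → Bool
  | [] => false
  | c :: rest => pats.any (fun s => pvIsPrefix s (c :: rest)) || pvSuffixScan pats rest

-- 'any(s == p for s in banned_sentences)'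
def pvEqScan (p : List Char) : List String → Bool
  | [] => false
  | s :: rest => s.toList == p || pvEqScan p rest

def prompt_hits_banned_py_alt (prompt : String) (banned_sentences : List String) (match_substring : Bool) : Bool :=
  let p := (PySem.Str.strip prompt).toList
  if p = [] ∨ banned_sentences = [] then false
  else if match_substring then
    pvSuffixScan (banned_sentences.filterMap (fun s => if s.toList = [] then none else some s.toList)) p
  else
    pvEqScan p banned_sentences

-- ===== PRECONDITION & SPEC =====
def Spec_prompt_hits_banned_py (prompt : String) (banned_sentences : List String) (match_substring : Bool) (out : Bool) : Prop := out = prompt_hits_banned_py_alt prompt banned_sentences match_substring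
instance (prompt : String) (banned_sentences : List String) (match_substring : Bool) (out : Bool) : Decidable (Spec_prompt_hits_banned_py prompt banned_sentences match_substring out) := by unfold Spec_prompt_hits_banned_py; infer_instance

-- ===== CLAIM (what is proved, stated in full; the proofs are below) =====
def Claim_equal_prompt_hits_banned_py : Prop := ∀ (prompt : String) (banned_sentences : List String) (match_substring : Bool), Dom_prompt_hits_banned_py prompt banned_sentences match_substring → Spec_prompt_hits_banned_py prompt banned_sentences match_substring (prompt_hits_banned_py prompt banned_sentences match_substring)

-- ===== LEMMAS AND PROOFS =====

lemma pvIsPrefix_iff (s cs : List Char) : pvIsPrefix s cs = true ↔ s <+: cs := by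
  induction s generalizing cs with
  | nil => simp [pvIsPrefix]
  | cons a as ih =>
    cases cs with
    | nil => simp [pvIsPrefix]
    | cons b bs => simp only [pvIsPrefix, Bool.and_eq_true, beq_iff_eq, ih, List.cons_prefix_cons]

lemma pvSuffixScan_iff (pats : List (List Char)) (cs : List Char)
    (hne : ∀ s ∈ pats, s ≠ []) :
    pvSuffixScan pats cs = true ↔ ∃ s ∈ pats, s <:+: cs := by
  induction cs with
  | nil =>
    simp only [pvSuffixScan, Bool.false_eq_true, false_iff]
    rintro ⟨s, hs, hinf⟩
    exact hne s hs (List.eq_nil_of_infix_nil hinf)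
  | cons c rest ih =>
    simp only [pvSuffixScan, Bool.or_eq_true, List.any_eq_true, pvIsPrefix_iff, ih]
    constructor
    · rintro (⟨s, hs, h⟩ | ⟨s, hs, h⟩)
      · exact ⟨s, hs, h.isInfix⟩
      · exact ⟨s, hs, h.trans (List.suffix_cons c rest).isInfix⟩
    · rintro ⟨s, hs, h⟩
      rcases List.infix_cons_iff.mp h with h' | h'
      · exact Or.inl ⟨s, hs, h'⟩
      · exact Or.inr ⟨s, hs, h'⟩

lemma pvEqScan_iff (p : List Char) (l : List String) :
    pvEqScan p l = true ↔ String.ofList p ∈ l := by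
  induction l with
  | nil => simp [pvEqScan]
  | cons s rest ih =>
    simp only [pvEqScan, Bool.or_eq_true, beq_iff_eq, ih, List.mem_cons]
    constructor
    · rintro (h | h)
      · exact Or.inl (by rw [← h, String.ofList_toList])
      · exact Or.inr h
    · rintro (h | h)
      · exact Or.inl (by rw [← h, String.toList_ofList])
      · exact Or.inr h

-- ===== VERDICT (by name: the statement is the Claim_ definition above) =====
theorem prompt_hits_banned_py_spec : Claim_equal_prompt_hits_banned_py := by
  intro prompt banned match_substring _
  unfold Spec_prompt_hits_banned_py prompt_hits_banned_py prompt_hits_banned_py_alt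
  simp only
  by_cases hB : banned = []
  · subst hB; simp
  by_cases hP : (PySem.Str.strip prompt).toList = []
  · have : PySem.Str.strip prompt == "" := by
      rw [beq_iff_eq]; exact String.toList_eq_nil_iff.mp hP
    simp [hB, hP, this]
  · have hP' : ¬ (PySem.Str.strip prompt == "") := by
      rw [beq_iff_eq]; intro h; exact hP (by simp [h])
    have hBne : ¬ banned.isEmpty := by simpa [List.isEmpty_iff] using hB
    simp only [hBne, Bool.false_eq_true, if_false, hP', hP, hB, or_self, if_false]
    cases match_substring with
    | false =>
      simp only [Bool.false_eq_true, if_false]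
      rw [Bool.eq_iff_iff, List.contains_iff_mem, pvEqScan_iff, String.ofList_toList]
    | true =>
      simp only [if_true]
      rw [Bool.eq_iff_iff, List.any_eq_true,
        pvSuffixScan_iff _ _ (by
          intro s hs
          simp only [List.mem_filterMap] at hs
          obtain ⟨t, _, ht⟩ := hs
          by_cases h : t.toList = [] <;> simp [h] at ht
          exact ht ▸ h)]
      constructor
      · rintro ⟨s, hs, hprop⟩
        rw [Bool.and_eq_true] at hprop
        obtain ⟨hne, hin⟩ := hprop
        refine ⟨s.toList, List.mem_filterMap.mpr ⟨s, hs, ?_⟩, ?_⟩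
        · have : s.toList ≠ [] := fun h =>
            (bne_iff_ne.mp hne) (String.toList_eq_nil_iff.mp h)
          simp [this]
        · exact (PySem.Str.isIn_iff_infix s _).mp hin
      · rintro ⟨sl, hsl, hinf⟩
        obtain ⟨s, hs, ht⟩ := List.mem_filterMap.mp hsl
        by_cases h : s.toList = [] <;> simp [h] at ht
        subst ht
        refine ⟨s, hs, ?_⟩
        rw [Bool.and_eq_true]
        exact ⟨bne_iff_ne.mpr (fun he => h (by simp [he])), (PySem.Str.isIn_iff_infix s _).mpr hinf⟩
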